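-- pv_equiv track=rewrite | github.com/hswek/algorithm | 프로그래머스/3/12938. 최고의 집합/최고의 집합.py | solution
-- ===== SOURCE A (Python) =====
-- def solution(n, s):
--     answer = []
--     if n>s:
--         return [-1]
--     else:
--         for i in range(n):
--             answer.append(s//n)
--         for i in range(s%n):
--             answer[-1-i]+=1
--     return answer
-- ===== SOURCE B (Python) =====
-- def solution(n, s):
--     if n > s:
--         return [-1]
--     answer = []
--     for i in range(n, 0, -1):
--         x = s // i
--         answer.append(x)
--         s -= x
--     return answer
-- ===== Notes on version B (the rewrite author's own statement) =====
-- stated objective: alternative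
-- what changed: Replaces A's fill-with-s//n-then-increment-the-tail two-pass scheme with a single greedy pass that has no modulo at all: each element is remaining_sum // remaining_count and is subtracted from the running sum, which provably yields the same evenly distributed list.
import Mathlib
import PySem

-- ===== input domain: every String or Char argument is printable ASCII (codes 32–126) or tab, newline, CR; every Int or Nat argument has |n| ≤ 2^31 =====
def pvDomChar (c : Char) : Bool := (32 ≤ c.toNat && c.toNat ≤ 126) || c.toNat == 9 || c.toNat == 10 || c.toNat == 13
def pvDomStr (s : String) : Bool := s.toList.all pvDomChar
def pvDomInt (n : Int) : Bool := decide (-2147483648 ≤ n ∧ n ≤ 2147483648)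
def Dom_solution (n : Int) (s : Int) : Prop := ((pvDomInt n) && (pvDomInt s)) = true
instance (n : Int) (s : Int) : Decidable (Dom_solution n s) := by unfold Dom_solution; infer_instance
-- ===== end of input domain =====

-- B replaces A's fill-then-increment-the-tail two passes by one greedy pass with
-- no modulo: each element is remaining_sum // remaining_count (alternative, same cost).

-- ===== PORT A =====
def solution (n : Int) (s : Int) : List Int :=
  if n > s then [-1]
  else
    let answer : List Int :=
      (PySem.List.pyRange 0 n 1).foldl (fun acc _ => acc ++ [PySem.Int.floordiv s n]) []
    (PySem.List.pyRange 0 (PySem.Int.mod s n) 1).foldl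
      (fun acc i => PySem.List.pySetD acc (-1 - i) (PySem.List.pyGetD acc (-1 - i) 0 + 1))
      answer

-- ===== PORT B =====
def solution_alt (n : Int) (s : Int) : List Int :=
  if n > s then [-1]
  else
    ((PySem.List.pyRange n 0 (-1)).foldl
      (fun st i =>
        let x := PySem.Int.floordiv st.2 i
        (st.1 ++ [x], st.2 - x))
      (([] : List Int), s)).1

-- ===== PRECONDITION & SPEC =====
-- Pre_ excludes exactly the inputs where the Python A raises ZeroDivisionError
-- (n == 0 with 0 ≤ s, so the n > s guard does not fire and s % n divides by zero).
def Pre_solution (n : Int) (s : Int) : Prop := ¬ (n = 0 ∧ 0 ≤ s)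
instance (n : Int) (s : Int) : Decidable (Pre_solution n s) := by unfold Pre_solution; infer_instance
def pvWitness_solution : Int × Int := (3, 11)

def Spec_solution (n : Int) (s : Int) (out : List Int) : Prop := out = solution_alt n s
instance (n : Int) (s : Int) (out : List Int) : Decidable (Spec_solution n s out) := by unfold Spec_solution; infer_instance

-- ===== CLAIM (what is proved, stated in full; the proofs are below) =====
def Claim_equal_solution : Prop := ∀ (n : Int) (s : Int), Dom_solution n s → Pre_solution n s → Spec_solution n s (solution n s)

-- ===== LEMMAS AND PROOFS =====

-- A's first loop: appending a constant once per range element builds a replicate.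
theorem pv_append_loop {α : Type} (l : List Int) (c : α) (acc : List α) :
    l.foldl (fun a _ => a ++ [c]) acc = acc ++ List.replicate l.length c := by
  induction l generalizing acc with
  | nil => simp
  | cons x xs ih => simp [List.foldl_cons, ih, List.replicate_succ]

theorem pv_pyIdx_neg (L k : Nat) (h : k + 1 ≤ L) :
    PySem.List.pyIdx? L (-1 - (k : Int)) = some (L - (k + 1)) := by
  unfold PySem.List.pyIdx?
  rw [if_neg (by omega), if_pos (by omega)]
  congr 1
  omega

theorem pv_set_replicate_last {α : Type} (m : Nat) (q v : α) :
    (List.replicate (m + 1) q).set m v = List.replicate m q ++ [v] := by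
  induction m with
  | zero => rfl
  | succ m ih =>
    rw [List.replicate_succ, List.set_cons_succ, ih, List.replicate_succ, List.cons_append]

-- A's second loop: incrementing the last k slots of a replicate, one per range element.
theorem pv_inc_loop (q : Int) (k L : Nat) (hk : k ≤ L) :
    (PySem.List.pyRange 0 (k : Int) 1).foldl
      (fun acc i => PySem.List.pySetD acc (-1 - i) (PySem.List.pyGetD acc (-1 - i) 0 + 1))
      (List.replicate L q)
    = List.replicate (L - k) q ++ List.replicate k (q + 1) := by
  induction k with
  | zero => simp [PySem.List.pyRange_one_eq_nil (by omega : (0:Int) ≤ 0)]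
  | succ k ih =>
    have hk' : k ≤ L := Nat.le_of_succ_le hk
    have hc : ((k + 1 : Nat) : Int) = (k : Int) + 1 := by push_cast; ring
    rw [hc, PySem.List.pyRange_one_succ_right (by positivity), List.foldl_append, ih hk']
    simp only [List.foldl_cons, List.foldl_nil]
    have hidx : PySem.List.pyIdx?
        (List.replicate (L - k) q ++ List.replicate k (q + 1)).length (-1 - (k : Int))
        = some (L - (k + 1)) := by
      rw [show (List.replicate (L - k) q ++ List.replicate k (q + 1)).length = L by simp; omega]
      exact pv_pyIdx_neg L k hk
    have hget : PySem.List.pyGetD (List.replicate (L - k) q ++ List.replicate k (q + 1)) (-1 - (k : Int)) 0 = q := by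
      simp only [PySem.List.pyGetD, PySem.List.pyGet?, hidx, Option.bind_some]
      rw [List.getElem?_append_left (by simp; omega)]
      simp [show L - (k + 1) < L - k by omega]
    rw [hget]
    simp only [PySem.List.pySetD, PySem.List.pySet?, hidx, Option.map_some, Option.getD_some]
    rw [List.set_append_left _ _ (by simp; omega)]
    rw [show L - k = (L - (k + 1)) + 1 by omega, pv_set_replicate_last]
    simp [List.append_assoc, List.replicate_succ]

theorem pv_fmod_bounds_neg (s n : Int) (hn : n < 0) : n < Int.fmod s n ∧ Int.fmod s n ≤ 0 := by
  have h1 := Int.fmod_nonneg_of_pos (-s) (show (0:Int) < -n by omega)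
  have h2 := Int.fmod_lt_of_pos (-s) (show (0:Int) < -n by omega)
  have h3 : (-(-s)).fmod (-(-n)) = -((-s).fmod (-n)) := Int.neg_fmod_neg _ _
  simp only [neg_neg] at h3
  omega

-- Uniqueness: if s = m*q + r with 0 ≤ r < m then fdiv s m = q and fmod s m = r.
theorem pv_fdiv_fmod_unique (m q r : Int) (hr0 : 0 ≤ r) (hrm : r < m) :
    Int.fdiv (m * q + r) m = q ∧ Int.fmod (m * q + r) m = r := by
  have hm : 0 < m := lt_of_le_of_lt hr0 hrm
  have hd : Int.fdiv (m * q + r) m = q := by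
    rw [show m * q + r = r + m * q by ring, Int.add_mul_fdiv_left r q (by omega : m ≠ 0),
        Int.fdiv_eq_ediv_of_nonneg _ (le_of_lt hm), Int.ediv_eq_zero_of_lt hr0 hrm]
    ring
  refine ⟨hd, ?_⟩
  have h2 := Int.mul_fdiv_add_fmod (m * q + r) m
  rw [hd] at h2
  omega

-- B's greedy loop: over a positive count m it builds exactly the floor/remainder layout.
theorem pv_greedy_loop (m : Nat) (hm : 0 < m) (s : Int) (acc : List Int) :
    (PySem.List.pyRange (m : Int) 0 (-1)).foldl
      (fun st i =>
        let x := PySem.Int.floordiv st.2 i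
        (st.1 ++ [x], st.2 - x))
      (acc, s)
    = (acc ++ List.replicate (m - (Int.fmod s m).toNat) (Int.fdiv s m)
           ++ List.replicate (Int.fmod s m).toNat (Int.fdiv s m + 1), 0) := by
  induction m generalizing s acc with
  | zero => omega
  | succ m ih =>
    rw [PySem.List.pyRange_neg_one_cons (by positivity)]
    simp only [List.foldl_cons]
    have hfd : PySem.Int.floordiv s ((m : Int) + 1) = Int.fdiv s ((m : Int) + 1) := rfl
    by_cases hm0 : m = 0
    · subst hm0
      rw [PySem.List.pyRange_neg_one_eq_nil (by norm_num)]
      simp only [List.foldl_nil]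
      have h1 : Int.fdiv s 1 = s := Int.fdiv_one s
      have h2 : Int.fmod s 1 = 0 := Int.fmod_one s
      simp [h1, h2]
    · have hmpos : 0 < m := Nat.pos_of_ne_zero hm0
      set q := Int.fdiv s ((m : Int) + 1) with hq
      set r := Int.fmod s ((m : Int) + 1) with hr
      have hr0 : 0 ≤ r := Int.fmod_nonneg_of_pos s (by positivity)
      have hrlt : r < (m : Int) + 1 := Int.fmod_lt_of_pos s (by positivity)
      have hs : s = ((m : Int) + 1) * q + r := by
        rw [hq, hr]; exact (Int.mul_fdiv_add_fmod s _).symm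
      have hsx : s - q = (m : Int) * q + r := by rw [hs]; ring
      have hcast : (((m : Nat) + 1 : Nat) : Int) = (m : Int) + 1 := by push_cast; ring
      rw [show (((m + 1 : Nat)) : Int) - 1 = (m : Int) by push_cast; ring] at *
      simp only [hcast, hfd, ← hq]
      rw [ih hmpos (s - q) (acc ++ [q])]
      by_cases hre : r = (m : Int)
      · -- remainder equals the new count: everything left gets q + 1
        have := pv_fdiv_fmod_unique (m : Int) (q + 1) 0 le_rfl (by exact_mod_cast hmpos)
        have hdiv : Int.fdiv (s - q) (m : Int) = q + 1 := by
          rw [hsx, hre, show (m : Int) * q + (m : Int) = (m : Int) * (q + 1) + 0 by ring]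
          exact this.1
        have hmod : Int.fmod (s - q) (m : Int) = 0 := by
          rw [hsx, hre, show (m : Int) * q + (m : Int) = (m : Int) * (q + 1) + 0 by ring]
          exact this.2
        rw [hdiv, hmod, ← hr,
            show ((m : Nat) + 1) - r.toNat = 1 by omega, show r.toNat = m by omega]
        simp [List.replicate_succ, List.append_assoc]
      · -- remainder below the new count: quotient and remainder are unchanged
        have hrlt' : r < (m : Int) := lt_of_le_of_ne (by omega) hre
        have := pv_fdiv_fmod_unique (m : Int) q r hr0 hrlt'
        have hdiv : Int.fdiv (s - q) (m : Int) = q := by rw [hsx]; exact this.1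
        have hmod : Int.fmod (s - q) (m : Int) = r := by rw [hsx]; exact this.2
        rw [hdiv, hmod, ← hr,
            show ((m : Nat) + 1) - r.toNat = ((m : Nat) - r.toNat) + 1 by omega]
        simp [List.replicate_succ, List.append_assoc]

-- B's greedy loop restated with an Int count, as the verdict needs it.
theorem pv_greedy_int (nn s : Int) (hn : 0 < nn) :
    ((PySem.List.pyRange nn 0 (-1)).foldl
      (fun st i =>
        let x := PySem.Int.floordiv st.2 i
        (st.1 ++ [x], st.2 - x))
      (([] : List Int), s)).1
    = List.replicate (nn - Int.fmod s nn).toNat (Int.fdiv s nn)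
        ++ List.replicate (Int.fmod s nn).toNat (Int.fdiv s nn + 1) := by
  have h : nn = ((nn.toNat : Nat) : Int) := (Int.toNat_of_nonneg hn.le).symm
  rw [h, pv_greedy_loop nn.toNat (by omega) s []]
  have hr0 := Int.fmod_nonneg_of_pos s (show (0:Int) < ((nn.toNat : Nat) : Int) by omega)
  have hrlt := Int.fmod_lt_of_pos s (show (0:Int) < ((nn.toNat : Nat) : Int) by omega)
  simp only [List.nil_append]
  rw [show nn.toNat - (Int.fmod s ((nn.toNat : Nat) : Int)).toNat
        = (((nn.toNat : Nat) : Int) - Int.fmod s ((nn.toNat : Nat) : Int)).toNat by omega]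

-- ===== VERDICT (by name: the statement is the Claim_ definition above) =====
theorem solution_spec : Claim_equal_solution := by
  intro n s _ hpre
  unfold Spec_solution solution solution_alt
  by_cases hgt : n > s
  · simp [hgt]
  · simp only [if_neg hgt]
    rcases lt_trichotomy n 0 with hn | hn | hn
    · -- n < 0 : every loop range is empty on both sides; both return [].
      have hb := pv_fmod_bounds_neg s n hn
      have hmod : PySem.Int.mod s n = Int.fmod s n := rfl
      rw [PySem.List.pyRange_one_eq_nil (by omega : n ≤ (0:Int))]
      rw [PySem.List.pyRange_one_eq_nil (by rw [hmod]; omega : PySem.Int.mod s n ≤ (0:Int))]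
      rw [PySem.List.pyRange_neg_one_eq_nil (by omega : n ≤ (0:Int))]
      simp
    · exact absurd ⟨hn, by omega⟩ hpre
    · -- n > 0 : A builds the replicate layout; B's greedy loop builds the same one.
      have hmod : PySem.Int.mod s n = Int.fmod s n := rfl
      have hr0 : 0 ≤ PySem.Int.mod s n := by rw [hmod]; exact Int.fmod_nonneg_of_pos s hn
      have hrn : PySem.Int.mod s n < n := by rw [hmod]; exact Int.fmod_lt_of_pos s hn
      rw [pv_append_loop, List.nil_append, PySem.List.length_pyRange_one]
      rw [show PySem.Int.mod s n = (((PySem.Int.mod s n).toNat : Nat) : Int) from (Int.toNat_of_nonneg hr0).symm]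
      rw [pv_inc_loop _ _ _ (by omega : (PySem.Int.mod s n).toNat ≤ (n - 0).toNat)]
      rw [pv_greedy_int n s hn]
      have hfd : PySem.Int.floordiv s n = Int.fdiv s n := rfl
      rw [hfd, hmod,
          show ((n - 0).toNat - (Int.fmod s n).toNat) = (n - Int.fmod s n).toNat by
            rw [hmod] at hr0 hrn; omega]
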